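-- pv_equiv track=rewrite | github.com/Varunaditya/practice_pad | Python/justify_text.py | handle_spaces
-- ===== SOURCE A (Python) =====
-- def handle_spaces(words: list, k: int) -> str:
--     n_words = sum([len(i) for i in words])
--     filler = (k - n_words)
--     if len(words) == 1:
--         return words[0] + ' ' * filler
--     divider = len(words) - 1
--     while filler > 0:
--         words[filler % divider] += ' '
--         filler -= 1
--     return ''.join(words)
-- ===== SOURCE B (Python) =====
-- def handle_spaces(words: list, k: int) -> str:
--     if len(words) == 1:
--         return words[0] + ' ' * (k - len(words[0]))
--     d = len(words) - 1
--     filler = k - sum(len(w) for w in words)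
--     gaps = [' ' * (filler // d if i == 0 else (filler - i) // d + 1) for i in range(d)]
--     return ''.join(w + g for w, g in zip(words, gaps + ['']))
-- ===== Notes on version B (the rewrite author's own statement) =====
-- stated objective: alternative
-- what changed: B computes each gap's space count in closed form ((filler-i)//divider, +1 for i>0) and emits each gap as one bulk ' '*c joined with the words, instead of A's loop that appends one space per remaining filler unit (filler iterations, mutating the input list).
import Mathlib
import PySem

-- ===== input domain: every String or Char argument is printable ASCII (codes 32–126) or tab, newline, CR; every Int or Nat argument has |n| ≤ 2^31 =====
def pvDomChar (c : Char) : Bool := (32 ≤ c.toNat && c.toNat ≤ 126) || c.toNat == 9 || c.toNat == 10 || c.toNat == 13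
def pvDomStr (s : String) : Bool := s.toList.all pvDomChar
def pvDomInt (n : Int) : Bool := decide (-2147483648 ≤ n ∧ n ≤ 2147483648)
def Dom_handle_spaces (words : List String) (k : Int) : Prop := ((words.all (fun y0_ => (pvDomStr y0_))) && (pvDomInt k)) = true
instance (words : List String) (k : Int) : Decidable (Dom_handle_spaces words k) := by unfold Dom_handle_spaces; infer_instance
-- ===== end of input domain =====

-- Alternative algorithm: B replaces A's one-space-at-a-time filler loop by a closed-form
-- space count per gap ((filler - i) // divider, +1 for i > 0), one bulk repeat per gap.
-- NOTE: Python A mutates `words` in place (appends spaces to its elements); B does not.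
-- The equivalence proved here is about the RETURN value only.

-- ===== PORT A =====
-- the while loop: fuel = filler.toNat; at each step the current filler value is m+1.
-- pyGetD/pySetD are the total forms of words[i] read/write; inside Pre_ the index is in range.
def handle_spaces_loop (divider : Int) : List String → Nat → List String
  | ws, 0 => ws
  | ws, m+1 =>
    let idx := PySem.Int.mod ((m : Int) + 1) divider
    let w := PySem.List.pyGetD ws idx ""
    handle_spaces_loop divider (PySem.List.pySetD ws idx (String.ofList (w.toList ++ [' ']))) m

def handle_spaces (words : List String) (k : Int) : String :=
  let n_words := (words.map (fun i => (PySem.Str.len i : Int))).sum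
  let filler := k - n_words
  if words.length == 1 then
    String.ofList ((PySem.List.pyGetD words 0 "").toList ++ PySem.List.pyRepeat [' '] filler)
  else
    let divider := (words.length : Int) - 1
    PySem.Str.join "" (handle_spaces_loop divider words filler.toNat)

-- ===== PORT B =====
def handle_spaces_alt (words : List String) (k : Int) : String :=
  if words.length == 1 then
    let w := PySem.List.pyGetD words 0 ""
    String.ofList (w.toList ++ PySem.List.pyRepeat [' '] (k - (PySem.Str.len w : Int)))
  else
    let d := (words.length : Int) - 1
    let filler := k - (words.map (fun w => (PySem.Str.len w : Int))).sum
    let gaps := (PySem.List.pyRange 0 d 1).map (fun i =>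
      String.ofList (PySem.List.pyRepeat [' ']
        (if i == 0 then PySem.Int.floordiv filler d else PySem.Int.floordiv (filler - i) d + 1)))
    PySem.Str.join "" ((words.zip (gaps ++ [""])).map
      (fun p => String.ofList (p.1.toList ++ p.2.toList)))

-- ===== PRECONDITION & SPEC =====
-- Pre_ excludes only words = [] with k > 0, where A raises IndexError (words[k % -1] on []).
def Pre_handle_spaces (words : List String) (k : Int) : Prop := words = [] → k ≤ 0
instance (words : List String) (k : Int) : Decidable (Pre_handle_spaces words k) := by
  unfold Pre_handle_spaces; infer_instance
def pvWitness_handle_spaces : List String × Int := (["ab", "c", "d"], 9)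

def Spec_handle_spaces (words : List String) (k : Int) (out : String) : Prop :=
  out = handle_spaces_alt words k
instance (words : List String) (k : Int) (out : String) : Decidable (Spec_handle_spaces words k out) := by
  unfold Spec_handle_spaces; infer_instance

-- ===== CLAIM =====
def Claim_equal_handle_spaces : Prop := ∀ (words : List String) (k : Int),
  Dom_handle_spaces words k → Pre_handle_spaces words k →
  Spec_handle_spaces words k (handle_spaces words k)

-- ===== LEMMAS AND PROOFS =====

-- number of loop steps (values v = 1..F) that append a space to word j
def cntSp (d : Int) (j : Nat) : Nat → Nat
  | 0 => 0
  | m+1 => cntSp d j m + (if (PySem.Int.mod ((m : Int) + 1) d).toNat = j then 1 else 0)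

theorem ediv_succ (d a : Int) (hd : 0 < d) :
    (a + 1) / d = a / d + (if (a + 1) % d = 0 then 1 else 0) := by
  have h0 : 0 ≤ a % d := Int.emod_nonneg a (by omega)
  have h1 : a % d < d := Int.emod_lt_of_pos a hd
  have hae : d * (a / d) + a % d = a := Int.mul_ediv_add_emod a d
  by_cases hc : a % d = d - 1
  · have ha1 : a + 1 = d * (a / d + 1) := by rw [mul_add]; omega
    have hq : (a + 1) / d = a / d + 1 := by rw [ha1, Int.mul_ediv_cancel_left _ (by omega)]
    have hm : (a + 1) % d = 0 := by rw [ha1]; exact Int.mul_emod_right d _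
    simp [hq, hm]
  · have ha1 : a + 1 = (a % d + 1) + (a / d) * d := by rw [mul_comm] at hae; omega
    have hq : (a + 1) / d = a / d := by
      rw [ha1, Int.add_mul_ediv_right _ _ (by omega : d ≠ 0),
        Int.ediv_eq_zero_of_lt (by omega) (by omega)]
      omega
    have hm : (a + 1) % d = a % d + 1 := by
      rw [ha1, Int.add_mul_emod_self_right, Int.emod_eq_of_lt (by omega) (by omega)]
    rw [hm]
    have : ¬ (a % d + 1 = 0) := by omega
    simp [hq, this]
theorem emod_eq_iff_sub_emod (d s j : Int) (hd : 0 < d) (hj0 : 0 ≤ j) (hj : j < d) :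
    s % d = j ↔ (s - j) % d = 0 := by
  have hsub : (s - j) % d = (s % d - j) % d := by
    conv_lhs => rw [Int.sub_emod]
    rw [Int.emod_eq_of_lt hj0 hj]
  have h0 : 0 ≤ s % d := Int.emod_nonneg s (by omega)
  have h1 : s % d < d := Int.emod_lt_of_pos s hd
  constructor
  · intro h; rw [hsub, h]; simp
  · intro h
    rw [hsub] at h
    have hdvd : d ∣ (s % d - j) := Int.dvd_of_emod_eq_zero h
    have := Int.eq_zero_of_abs_lt_dvd hdvd (by rw [abs_lt]; omega)
    omega
theorem cntSp_closed (d : Int) (j F : Nat) (hd : 0 < d) (hj : (j : Int) < d) :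
    cntSp d j F = ((PySem.Int.floordiv ((F : Int) - j) d) + (if j = 0 then 0 else 1)).toNat := by
  induction F with
  | zero =>
    rcases Nat.eq_zero_or_pos j with h | h
    · subst h; simp [cntSp, PySem.Int.floordiv_eq_ediv_of_pos hd]
    · have hne : ¬ (j = 0) := by omega
      have hdj : (-(j : Int)) / d = -1 := by
        have h1 : (-(j : Int)) = (d - j) + (-1) * d := by ring
        rw [h1, Int.add_mul_ediv_right _ _ (by omega : d ≠ 0),
          Int.ediv_eq_zero_of_lt (by omega) (by omega)]
        norm_num
      simp [cntSp, PySem.Int.floordiv_eq_ediv_of_pos hd, hdj, hne]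
  | succ m ih =>
    have hstep : ((m : Int) + 1 - j) = ((m : Int) - j) + 1 := by ring
    have hq1 : -1 ≤ ((m : Int) - j) / d :=
      (Int.le_ediv_iff_mul_le hd).mpr (by omega)
    show cntSp d j m + (if (PySem.Int.mod ((m : Int) + 1) d).toNat = j then 1 else 0) = _
    rw [ih]
    push_cast
    simp only [PySem.Int.floordiv_eq_ediv_of_pos hd, PySem.Int.mod_eq_emod_of_pos hd]
    rw [hstep, ediv_succ d _ hd]
    have h0 : 0 ≤ ((m : Int) + 1) % d := Int.emod_nonneg _ (by omega)
    have hiff : (((m : Int) + 1) % d).toNat = j ↔ (((m : Int) - j) + 1) % d = 0 := by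
      rw [show ((m : Int) - j) + 1 = ((m : Int) + 1) - j by ring,
          ← emod_eq_iff_sub_emod d _ _ hd (by omega) hj]
      omega
    by_cases hc : (((m : Int) - j) + 1) % d = 0
    · have hind : (((m : Int) + 1) % d).toNat = j := hiff.mpr hc
      have hdvd : d ∣ (((m : Int) - j) + 1) := Int.dvd_of_emod_eq_zero hc
      have hge : 0 ≤ ((m : Int) - j) + 1 := by
        by_contra hlt
        have : d ≤ -(((m : Int) - j) + 1) := Int.le_of_dvd (by omega) (dvd_neg.mpr hdvd)
        omega
      have hq2 : 0 ≤ (((m : Int) - j) + 1) / d := Int.ediv_nonneg hge (by omega)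
      rw [ediv_succ d _ hd, if_pos hc] at hq2
      simp only [hind, hc, if_true]
      rcases Nat.eq_zero_or_pos j with h | h
      · have : 0 ≤ ((m : Int) - (j : Int)) / d := Int.ediv_nonneg (by omega) (by omega)
        simp only [if_pos h]
        omega
      · have hne : ¬ (j = 0) := by omega
        simp only [if_neg hne]
        omega
    · have hind : ¬ ((((m : Int) + 1) % d).toNat = j) := fun h => hc (hiff.mp h)
      simp [hind, hc]
theorem cntSp_ge (d : Int) (j F : Nat) (hd : 0 < d) (hj : d ≤ (j : Int)) :
    cntSp d j F = 0 := by
  induction F with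
  | zero => rfl
  | succ m ih =>
    have h0 := PySem.Int.mod_nonneg ((m : Int) + 1) hd
    have h1 := PySem.Int.mod_lt ((m : Int) + 1) hd
    have : ¬ ((PySem.Int.mod ((m : Int) + 1) d).toNat = j) := by omega
    simp [cntSp, ih, this]
theorem loop_eq_mapIdx (d : Int) (hd : 0 < d) (F : Nat) (ws : List String)
    (hle : d ≤ (ws.length : Int)) :
    handle_spaces_loop d ws F =
      ws.mapIdx (fun j w => String.ofList (w.toList ++ List.replicate (cntSp d j F) ' ')) := by
  induction F generalizing ws with
  | zero =>
    simp only [handle_spaces_loop, cntSp, List.replicate_zero, List.append_nil]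
    refine (List.ext_getElem (by simp) ?_).symm
    intro i h1 h2
    simp [List.getElem_mapIdx]
  | succ m ih =>
    have h0 : 0 ≤ PySem.Int.mod ((m : Int) + 1) d := PySem.Int.mod_nonneg _ hd
    have h1 : PySem.Int.mod ((m : Int) + 1) d < d := PySem.Int.mod_lt _ hd
    set idx := PySem.Int.mod ((m : Int) + 1) d with hidx
    have ht : idx.toNat < ws.length := by omega
    simp only [handle_spaces_loop]
    rw [PySem.List.pySetD_of_nonneg _ _ h0,
        PySem.List.pyGetD_eq_getElem _ _ h0 (by exact_mod_cast (by omega : idx < (ws.length : Int)))]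
    rw [ih _ (by simp; omega)]
    refine List.ext_getElem (by simp) ?_
    intro i hL hR
    have hiw : i < ws.length := by simpa using hR
    rw [List.getElem_mapIdx, List.getElem_mapIdx, List.getElem_set]
    by_cases hit : idx.toNat = i
    · subst hit
      have hc : cntSp d idx.toNat (m+1) = cntSp d idx.toNat m + 1 := by simp [cntSp, ← hidx]
      rw [if_pos rfl, hc, String.toList_ofList]
      simp [List.append_assoc, List.replicate_succ]
    · have hc : cntSp d i (m+1) = cntSp d i m := by simp [cntSp, ← hidx, hit]
      rw [if_neg hit, hc]
theorem cnt_eq_gap (d filler : Int) (i : Nat) (hd : 0 < d) (hi : (i : Int) < d) :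
    cntSp d i filler.toNat =
      (if (i : Int) == 0 then PySem.Int.floordiv filler d
       else PySem.Int.floordiv (filler - i) d + 1).toNat := by
  rcases le_or_gt 0 filler with hf | hf
  · have hcast : ((filler.toNat : Nat) : Int) = filler := Int.toNat_of_nonneg hf
    rw [cntSp_closed d i filler.toNat hd hi, hcast]
    by_cases h0 : i = 0
    · subst h0; simp
    · simp [h0]
  · have hF : filler.toNat = 0 := by omega
    rw [hF]
    by_cases h0 : (i : Int) = 0
    · have hle : PySem.Int.floordiv filler d < 0 :=
        (PySem.Int.floordiv_lt_iff_lt_mul (a := filler) (q := 0) hd).mpr (by rw [zero_mul]; omega)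
      simp [cntSp, h0]
      omega
    · have hne : ((i : Int) == 0) = false := by simp; exact_mod_cast h0
      have hle : PySem.Int.floordiv (filler - i) d < 0 :=
        (PySem.Int.floordiv_lt_iff_lt_mul (a := filler - i) (q := 0) hd).mpr (by rw [zero_mul]; omega)
      simp [cntSp, hne]
      omega

theorem two_case (ws : List String) (k : Int) (h2 : 2 ≤ ws.length) :
    handle_spaces ws k = handle_spaces_alt ws k := by
  have hif : (ws.length == 1) = false := by simp; omega
  have hd : 0 < (ws.length : Int) - 1 := by omega
  simp only [handle_spaces, handle_spaces_alt, hif, Bool.false_eq_true, if_false]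
  rw [loop_eq_mapIdx _ hd _ _ (by omega)]
  congr 1
  have hglen : ((PySem.List.pyRange 0 ((ws.length : Int) - 1) 1).map (fun i =>
      String.ofList (PySem.List.pyRepeat [' ']
        (if i == 0 then PySem.Int.floordiv (k - (ws.map (fun w => (PySem.Str.len w : Int))).sum) ((ws.length : Int) - 1)
         else PySem.Int.floordiv ((k - (ws.map (fun w => (PySem.Str.len w : Int))).sum) - i) ((ws.length : Int) - 1) + 1)))).length
      = ws.length - 1 := by
    simp [PySem.List.length_pyRange_one]
    try omega
  refine List.ext_getElem (by simp [List.length_zip]; try omega) ?_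
  intro i hL hR
  have hiw : i < ws.length := by simpa using hL
  simp only [List.getElem_mapIdx, List.getElem_map, List.getElem_zip]
  congr 1
  congr 1
  by_cases hlast : i < ws.length - 1
  · rw [List.getElem_append_left (by rw [hglen]; omega), List.getElem_map,
        PySem.List.getElem_pyRange_one, String.toList_ofList, PySem.List.pyRepeat_singleton]
    have hi : ((i : Int)) < (ws.length : Int) - 1 := by omega
    rw [cnt_eq_gap _ _ _ hd hi]
    simp only [zero_add]
  · rw [List.getElem_append_right (by rw [hglen]; omega)]
    have : cntSp ((ws.length : Int) - 1) i (k - (ws.map (fun w => (PySem.Str.len w : Int))).sum).toNat = 0 :=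
      cntSp_ge _ _ _ hd (by omega)
    rw [this]
    simp

theorem handle_spaces_spec : Claim_equal_handle_spaces := by
  intro words k hdom hpre
  unfold Spec_handle_spaces
  match words with
  | [] =>
    have hk : k ≤ 0 := hpre rfl
    have hk0 : k.toNat = 0 := by omega
    simp [handle_spaces, handle_spaces_alt, hk0, handle_spaces_loop]
  | [w] =>
    simp [handle_spaces, handle_spaces_alt]
  | w1 :: w2 :: rest =>
    exact two_case (w1 :: w2 :: rest) k (by simp)
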